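-- pv_equiv track=rewrite | github.com/ufal/omreval | evaluations/code/omreval/omreval/process_annotations.py | n_disagreements_in_annots
-- ===== SOURCE A (Python) =====
-- def n_disagreements_in_annots(annots):
--     """Counts the number of conflicts in the annotation."""
--     n_d = 0
--     for a in annots:
--         for e in annots[a]:
--             r, u = zip(*annots[a][e])
--             n_ones = len([a for a in r if a > 0])
--             n_conflicts = n_ones * (len(r) - n_ones)
--             n_d += n_conflicts
--     return n_d
-- ===== SOURCE B (Python) =====
-- def n_disagreements_in_annots(annots):
--     """Counts the number of conflicts in the annotation."""
--     n_d = 0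
--     for a in annots:
--         for e in annots[a]:
--             r, u = zip(*annots[a][e])
--             for i in range(len(r)):
--                 for j in range(i + 1, len(r)):
--                     if (r[i] > 0) != (r[j] > 0):
--                         n_d += 1
--     return n_d
-- ===== Notes on version B (the rewrite author's own statement) =====
-- stated objective: alternative
-- what changed: Per leaf, instead of counting positives once and using the product formula n_ones*(len-n_ones), B enumerates all unordered pairs of ratings and counts the pairs whose two values fall on opposite sides of 0.
import Mathlib
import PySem

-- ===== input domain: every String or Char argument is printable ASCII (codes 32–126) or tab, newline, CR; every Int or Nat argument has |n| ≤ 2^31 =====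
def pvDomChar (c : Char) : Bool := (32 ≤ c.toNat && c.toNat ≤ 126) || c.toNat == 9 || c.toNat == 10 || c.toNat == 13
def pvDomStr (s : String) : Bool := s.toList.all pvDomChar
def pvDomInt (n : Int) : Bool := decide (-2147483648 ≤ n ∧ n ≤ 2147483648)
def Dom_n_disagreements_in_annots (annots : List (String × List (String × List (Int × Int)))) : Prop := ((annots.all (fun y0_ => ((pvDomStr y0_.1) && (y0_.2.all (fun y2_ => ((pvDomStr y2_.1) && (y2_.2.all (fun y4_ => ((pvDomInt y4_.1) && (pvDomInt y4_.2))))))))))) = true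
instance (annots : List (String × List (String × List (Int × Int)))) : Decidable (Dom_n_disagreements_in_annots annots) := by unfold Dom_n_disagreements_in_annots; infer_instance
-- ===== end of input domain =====

-- B replaces A's per-leaf closed formula n_ones*(len-n_ones) by a direct count over all
-- unordered pairs of ratings (alternative decomposition, not faster).

-- ===== PORT A =====
-- per-leaf body of A: r, u = zip(*leaf); n_ones = len([a for a in r if a > 0]); n_ones * (len(r) - n_ones)
def pvLeafA (leaf : List (Int × Int)) : Int :=
  let r := leaf.map (·.1)
  let n_ones : Int := ((r.filter (fun x => decide (0 < x))).length : Int)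
  n_ones * ((r.length : Int) - n_ones)

def n_disagreements_in_annots (annots : List (String × List (String × List (Int × Int)))) : Int :=
  (PySem.Dict.ofList annots).items.foldl (fun n_d p =>
    (PySem.Dict.ofList p.2).items.foldl (fun n_d q =>
      n_d + pvLeafA q.2) n_d) 0

-- ===== PORT B =====
-- B's pair loop over r: outer index i = head position, inner j ranges over the suffix after i
def pvPairs : List Int → Int
  | [] => 0
  | x :: xs =>
      xs.foldl (fun n_d y => if (decide (0 < x)) != (decide (0 < y)) then n_d + 1 else n_d) 0
        + pvPairs xs

def pvLeafB (leaf : List (Int × Int)) : Int :=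
  let r := leaf.map (·.1)
  pvPairs r

def n_disagreements_in_annots_alt (annots : List (String × List (String × List (Int × Int)))) : Int :=
  (PySem.Dict.ofList annots).items.foldl (fun n_d p =>
    (PySem.Dict.ofList p.2).items.foldl (fun n_d q =>
      n_d + pvLeafB q.2) n_d) 0

-- ===== PRECONDITION & SPEC =====
-- Pre_ excludes inputs where some leaf list of the dict built from annots is empty:
-- there `r, u = zip(*annots[a][e])` raises ValueError in both A and B.
def Pre_n_disagreements_in_annots (annots : List (String × List (String × List (Int × Int)))) : Prop :=
  ∀ p ∈ (PySem.Dict.ofList annots).items, ∀ q ∈ (PySem.Dict.ofList p.2).items, q.2 ≠ []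
instance (annots : List (String × List (String × List (Int × Int)))) : Decidable (Pre_n_disagreements_in_annots annots) := by unfold Pre_n_disagreements_in_annots; infer_instance
def pvWitness_n_disagreements_in_annots : (List (String × List (String × List (Int × Int)))) :=
  [("a", [("e", [((1 : Int), (0 : Int)), (0, 1)])])]

def Spec_n_disagreements_in_annots (annots : List (String × List (String × List (Int × Int)))) (out : Int) : Prop := out = n_disagreements_in_annots_alt annots
instance (annots : List (String × List (String × List (Int × Int)))) (out : Int) : Decidable (Spec_n_disagreements_in_annots annots out) := by unfold Spec_n_disagreements_in_annots; infer_instance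

-- ===== CLAIM (what is proved, stated in full; the proofs are below) =====
def Claim_equal_n_disagreements_in_annots : Prop := ∀ (annots : List (String × List (String × List (Int × Int)))), Dom_n_disagreements_in_annots annots → Pre_n_disagreements_in_annots annots → Spec_n_disagreements_in_annots annots (n_disagreements_in_annots annots)

-- ===== LEMMAS AND PROOFS =====

-- the pairwise count equals A's product formula, for every list of ratings
theorem pvPairs_eq (r : List Int) :
    pvPairs r = ((r.countP (fun x => decide (0 < x)) : Nat) : Int)
      * ((r.length : Int) - ((r.countP (fun x => decide (0 < x)) : Nat) : Int)) := by
  induction r with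
  | nil => simp [pvPairs]
  | cons x xs ih =>
    have hk : xs.countP (fun x => decide (0 < x)) ≤ xs.length := List.countP_le_length
    have hsplit := List.length_eq_countP_add_countP (l := xs) (p := fun x => decide (0 < x))
    rw [pvPairs, ih, PySem.List.foldl_count_if]
    by_cases hx : 0 < x
    · have hc : xs.countP (fun y => (decide (0 < x)) != (decide (0 < y)))
          = xs.countP (fun y => !decide (0 < y)) :=
        List.countP_congr (fun y _ => by simp [hx])
      rw [hc, List.countP_cons_of_pos (p := fun x => decide (0 < x)) (by simp [hx])]
      have hc2 : xs.countP (fun y => !decide (0 < y))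
          = xs.length - xs.countP (fun x => decide (0 < x)) := by
        have hnot : xs.countP (fun a => decide ¬decide (0 < a) = true)
            = xs.countP (fun y => !decide (0 < y)) :=
          List.countP_congr (fun y _ => by simp)
        omega
      rw [hc2]
      simp only [List.length_cons]
      push_cast [Nat.cast_sub hk]
      ring
    · have hc : xs.countP (fun y => (decide (0 < x)) != (decide (0 < y)))
          = xs.countP (fun y => decide (0 < y)) :=
        List.countP_congr (fun y _ => by simp [hx])
      rw [hc, List.countP_cons_of_neg (p := fun x => decide (0 < x)) (by simp [hx])]
      simp only [List.length_cons]
      push_cast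
      ring

theorem pvLeaf_eq (leaf : List (Int × Int)) : pvLeafA leaf = pvLeafB leaf := by
  simp only [pvLeafA, pvLeafB, pvPairs_eq, List.countP_eq_length_filter]

-- ===== VERDICT (by name: the statement is the Claim_ definition above) =====
theorem n_disagreements_in_annots_spec : Claim_equal_n_disagreements_in_annots := by
  intro annots _ _
  unfold Spec_n_disagreements_in_annots n_disagreements_in_annots n_disagreements_in_annots_alt
  simp only [pvLeaf_eq]
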